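-- pv_equiv track=rewrite | github.com/jdamiba/flask-reddit-clone | helper_functions.py | salt_password
-- ===== SOURCE A (Python) =====
-- def salt_password(password):
--     iterations = 0
--     password_array = []
--     for char in password:
--         iterations += 1
--         password_array.append(char)
--         if iterations % 2 == 0:
--             password_array.append('Joe')
--     return ''.join(password_array)
-- ===== SOURCE B (Python) =====
-- def salt_password(password):
--     parts = []
--     while len(password) >= 2:
--         parts.append(password[:2] + 'Joe')
--         password = password[2:]
--     parts.append(password)
--     return ''.join(parts)
-- ===== Notes on version B (the rewrite author's own statement) =====
-- stated objective: simpler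
-- what changed: Replaces the per-character loop with its running iteration counter mod 2 and char-by-char accumulator by a chunk loop that peels two characters per step, appending each chunk followed by the salt marker and finally the short remainder.
import Mathlib
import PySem

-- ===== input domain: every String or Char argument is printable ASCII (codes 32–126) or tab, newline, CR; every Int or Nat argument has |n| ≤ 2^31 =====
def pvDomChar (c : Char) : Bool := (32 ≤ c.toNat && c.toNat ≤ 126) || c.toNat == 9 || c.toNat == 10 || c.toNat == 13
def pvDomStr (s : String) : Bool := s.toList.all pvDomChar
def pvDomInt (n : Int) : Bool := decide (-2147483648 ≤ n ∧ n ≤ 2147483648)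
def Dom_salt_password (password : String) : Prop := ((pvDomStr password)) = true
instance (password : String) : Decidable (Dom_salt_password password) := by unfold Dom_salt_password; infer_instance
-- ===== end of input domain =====

-- B replaces A's per-character counter-mod-2 loop by a chunk loop that peels two
-- characters per step and emits chunk + "Joe" (simpler); return values proved equal on all inputs.


-- ===== PORT A =====
-- loop step: iterations += 1; append the char; every second iteration also append 'Joe'
def saltStep (st : Int × List String) (c : Char) : Int × List String :=
  let iterations := st.1 + 1
  let arr := st.2 ++ [String.singleton c]
  if PySem.Int.mod iterations 2 == 0 then (iterations, arr ++ ["Joe"]) else (iterations, arr)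

def salt_password (password : String) : String :=
  let st := password.toList.foldl saltStep (0, [])
  PySem.Str.join "" st.2

-- ===== PORT B =====
-- Source B's while loop: while len ≥ 2, append the two-char chunk + "Joe" and drop it;
-- then append the (short) remainder and join everything
def altLoop : List Char → List (List Char) → List (List Char)
  | a :: b :: rest, parts => altLoop rest (parts ++ [[a, b, 'J', 'o', 'e']])
  | xs, parts => parts ++ [xs]

def salt_password_alt (password : String) : String :=
  String.ofList (PySem.Chars.join [] (altLoop password.toList []))

-- ===== PRECONDITION & SPEC =====
def Spec_salt_password (password : String) (out : String) : Prop := out = salt_password_alt password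
instance (password : String) (out : String) : Decidable (Spec_salt_password password out) := by unfold Spec_salt_password; infer_instance

-- ===== CLAIM (what is proved, stated in full; the proofs are below) =====
def Claim_equal_salt_password : Prop := ∀ (password : String), Dom_salt_password password → Spec_salt_password password (salt_password password)

-- ===== LEMMAS AND PROOFS =====

-- proof-only spec of the chunked output, shared by both invariants
def altGo : List Char → List Char
  | a :: b :: rest => a :: b :: 'J' :: 'o' :: 'e' :: altGo rest
  | xs => xs

-- B's loop accumulates exactly the chunked output
theorem altLoop_flatten (xs : List Char) : ∀ (parts : List (List Char)),
    (altLoop xs parts).flatten = parts.flatten ++ altGo xs := by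
  induction xs using altGo.induct with
  | case1 a b rest ih => intro parts; rw [altLoop, ih]; simp [altGo]
  | case2 xs hne =>
    intro parts
    match xs, hne with
    | [], _ => simp [altLoop, altGo]
    | [a], _ => simp [altLoop, altGo]
    | a :: b :: rest, hne => exact (hne a b rest rfl).elim

-- joining with the empty separator is flatten
theorem join_nil_eq_flatten (parts : List (List Char)) :
    PySem.Chars.join [] parts = parts.flatten := by
  induction parts with
  | nil => simp [PySem.Chars.join_nil]
  | cons p ps ih =>
    cases ps with
    | nil => simp [PySem.Chars.join_singleton]
    | cons q qs =>
      rw [PySem.Chars.join_cons_cons] at *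
      simp [ih]

-- loop invariant: from an even iteration counter, A's loop produces the chunked output of B
theorem salt_loop_inv (xs : List Char) : ∀ (n : Int) (arr : List String),
    PySem.Int.mod n 2 = 0 →
    ((xs.foldl saltStep (n, arr)).2.map String.toList).flatten
      = (arr.map String.toList).flatten ++ altGo xs := by
  have hm : ∀ m : Int, PySem.Int.mod m 2 = m % 2 :=
    fun m => PySem.Int.mod_eq_emod_of_pos (by norm_num)
  induction xs using altGo.induct with
  | case1 a b rest ih =>
    intro n arr h
    rw [hm] at h
    have h2 : PySem.Int.mod (n + 1 + 1) 2 = 0 := by rw [hm]; omega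
    show ((List.foldl saltStep (saltStep (saltStep (n, arr) a) b) rest).2.map String.toList).flatten = _
    rw [show saltStep (n, arr) a = (n + 1, arr ++ [String.singleton a]) by
          simp [saltStep]; omega,
        show saltStep (n + 1, arr ++ [String.singleton a]) b
            = (n + 1 + 1, arr ++ [String.singleton a] ++ [String.singleton b] ++ ["Joe"]) by
          simp [saltStep]; omega]
    rw [ih (n + 1 + 1) _ h2]
    simp [altGo, String.singleton]
  | case2 xs hne =>
    intro n arr h
    match xs, hne with
    | [], _ => simp [altGo]
    | [a], _ =>
      rw [hm] at h
      show ((List.foldl saltStep (saltStep (n, arr) a) []).2.map String.toList).flatten = _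
      rw [show saltStep (n, arr) a = (n + 1, arr ++ [String.singleton a]) by simp [saltStep]; omega]
      simp [altGo, String.singleton]
    | a :: b :: rest, hne => exact (hne a b rest rfl).elim

-- ===== VERDICT (by name: the statement is the Claim_ definition above) =====
theorem salt_password_spec : Claim_equal_salt_password := by
  intro password _
  unfold Spec_salt_password salt_password salt_password_alt
  have h := salt_loop_inv password.toList 0 [] (by decide)
  simp only [List.map_nil, List.flatten_nil, List.nil_append] at h
  apply String.toList_inj.mp
  rw [PySem.Str.toList_join, show ("" : String).toList = [] from rfl, join_nil_eq_flatten, h,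
      String.toList_ofList, join_nil_eq_flatten, altLoop_flatten]
  simp
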